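-- pv_equiv track=rewrite | github.com/NarutoWu11/Leetcode | Largest Rectangle in Histogram/1.py | process
-- ===== SOURCE A (Python) =====
-- def process(height):
--     width = [0, ] * len(height)
--     stack = []
--
--     for i in range(len(height)):
--         while len(stack) > 0 and height[stack[-1]] > height[i]:
--             temp = stack.pop()
--             width[temp] = i - temp - 1
--
--
--         stack.append(i)
--
--     for i in stack:
--         width[i] = len(height)- 1 - i
--
--     return width
-- ===== SOURCE B (Python) =====
-- def process(height):
--     n = len(height)
--     width = []
--     for i in range(n):
--         j = i + 1
--         while j < n and height[j] >= height[i]: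
--             j += 1
--         width.append(j - i - 1)
--     return width
-- ===== Notes on version B (the rewrite author's own statement) =====
-- stated objective: simpler
-- what changed: Replaced the monotonic stack (pop loop plus a second fix-up pass over the leftover stack) by a direct nested scan: for each i, walk right past all bars >= height[i] and record the distance to the first strictly smaller bar (or the end).
import Mathlib
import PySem

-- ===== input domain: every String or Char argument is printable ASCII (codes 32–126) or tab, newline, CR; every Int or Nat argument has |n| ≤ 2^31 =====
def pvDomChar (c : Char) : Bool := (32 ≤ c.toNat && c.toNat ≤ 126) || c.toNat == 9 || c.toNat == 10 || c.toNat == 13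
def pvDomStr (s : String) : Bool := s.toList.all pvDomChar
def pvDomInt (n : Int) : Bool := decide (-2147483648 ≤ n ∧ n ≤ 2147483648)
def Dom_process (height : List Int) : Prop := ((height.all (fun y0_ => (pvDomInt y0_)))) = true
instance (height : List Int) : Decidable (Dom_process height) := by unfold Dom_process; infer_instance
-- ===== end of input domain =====

-- B replaces A's monotonic stack by a direct nested rightward scan; objective: simpler (no stack, no second fix-up pass).

-- ===== PORT A =====
-- The Python stack (append/pop at the end, stack[-1] = top) is represented head-first:
-- the list head is the stack top; the final 'for i in stack' (bottom→top) becomes a fold over reverse.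
-- The inner 'while' loop: pop while height[stack[-1]] > height[i], writing width[temp] = i - temp - 1.
def popLoopA (height : List Int) (i : Nat) : List Int → List Nat → List Int × List Nat
  | width, [] => (width, [])
  | width, t :: rest =>
    if height.getD t 0 > height.getD i 0 then
      popLoopA height i (width.set t ((i : Int) - (t : Int) - 1)) rest
    else (width, t :: rest)

def stepA (height : List Int) (p : List Int × List Nat) (i : Nat) : List Int × List Nat :=
  let q := popLoopA height i p.1 p.2
  (q.1, i :: q.2)

def process (height : List Int) : List Int :=
  let n := height.length
  let p := (List.range n).foldl (stepA height) (List.replicate n 0, [])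
  p.2.reverse.foldl (fun w t => w.set t ((n : Int) - 1 - (t : Int))) p.1

-- ===== PORT B =====
-- the inner while loop of Source B: advance j while j < n and height[j] >= height[i]
def firstSmaller (height : List Int) (hi : Int) (j : Nat) : Nat :=
  if h : j < height.length then
    if height.getD j 0 ≥ hi then firstSmaller height hi (j + 1) else j
  else j
termination_by height.length - j

def process_alt (height : List Int) : List Int :=
  (List.range height.length).map
    (fun i => ((firstSmaller height (height.getD i 0) (i + 1) : Int)) - (i : Int) - 1)

-- ===== PRECONDITION & SPEC =====
def Spec_process (height : List Int) (out : List Int) : Prop := out = process_alt height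
instance (height : List Int) (out : List Int) : Decidable (Spec_process height out) := by unfold Spec_process; infer_instance

-- ===== CLAIM (what is proved, stated in full; the proofs are below) =====
def Claim_equal_process : Prop := ∀ (height : List Int), Dom_process height → Spec_process height (process height)

-- ===== LEMMAS AND PROOFS =====

-- characterization of firstSmaller: for j ≤ n it returns the least k ≥ j with height[k] < hi, else n
theorem firstSmaller_spec (height : List Int) (hi : Int) (j : Nat) (hj : j ≤ height.length) :
    let r := firstSmaller height hi j
    j ≤ r ∧ r ≤ height.length ∧
    (∀ k, j ≤ k → k < r → hi ≤ height.getD k 0) ∧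
    (r < height.length → height.getD r 0 < hi) := by
  intro r
  show j ≤ r ∧ _
  have : ∀ m j, j ≤ height.length → height.length - j ≤ m →
      j ≤ firstSmaller height hi j ∧ firstSmaller height hi j ≤ height.length ∧
      (∀ k, j ≤ k → k < firstSmaller height hi j → hi ≤ height.getD k 0) ∧
      (firstSmaller height hi j < height.length → height.getD (firstSmaller height hi j) 0 < hi) := by
    intro m
    induction m with
    | zero =>
      intro j hj hm
      have hj' : ¬ j < height.length := by omega
      rw [firstSmaller, dif_neg hj']
      exact ⟨le_refl _, by omega, fun k hk hk' => absurd hk' (by omega), fun h => absurd h hj'⟩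
    | succ m ih =>
      intro j hj hm
      rw [firstSmaller]
      by_cases hlt : j < height.length
      · rw [dif_pos hlt]
        by_cases hge : height.getD j 0 ≥ hi
        · rw [if_pos hge]
          obtain ⟨h1, h2, h3, h4⟩ := ih (j + 1) (by omega) (by omega)
          refine ⟨by omega, h2, ?_, h4⟩
          intro k hk hk'
          rcases Nat.eq_or_lt_of_le hk with rfl | hk
          · exact hge
          · exact h3 k hk hk'
        · rw [if_neg hge]
          exact ⟨le_refl _, by omega, fun k hk hk' => absurd hk' (by omega),
            fun _ => by omega⟩
      · rw [dif_neg hlt]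
        exact ⟨le_refl _, by omega, fun k hk hk' => absurd hk' (by omega), fun h => absurd h hlt⟩
  exact this (height.length - j) j hj (le_refl _)

-- uniqueness: any r with the least-strictly-smaller properties equals firstSmaller
theorem firstSmaller_unique (height : List Int) (hi : Int) (j r : Nat)
    (hj : j ≤ r) (hr : r ≤ height.length)
    (hall : ∀ k, j ≤ k → k < r → hi ≤ height.getD k 0)
    (hlt : r < height.length → height.getD r 0 < hi) :
    firstSmaller height hi j = r := by
  obtain ⟨h1, h2, h3, h4⟩ := firstSmaller_spec height hi j (by omega)
  set f := firstSmaller height hi j with hf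
  rcases Nat.lt_trichotomy f r with h | h | h
  · have := hall f h1 h
    have := h4 (by omega)
    omega
  · exact h
  · have := h3 r hj h
    have := hlt (by omega)
    omega

-- abbreviation for the spec value of index i
def fsv (height : List Int) (i : Nat) : Int :=
  ((firstSmaller height (height.getD i 0) (i + 1) : Nat) : Int) - (i : Int) - 1

-- the loop invariant of A's main fold, after processing indices 0..i-1
def InvA (height : List Int) (i : Nat) (p : List Int × List Nat) : Prop :=
  p.1.length = height.length ∧
  List.Pairwise (· > ·) p.2 ∧
  (∀ t ∈ p.2, t < i) ∧
  (∀ t ∈ p.2, ∀ k, t < k → k < i → height.getD t 0 ≤ height.getD k 0) ∧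
  (∀ j, j < i → j ∉ p.2 → p.1.getD j 0 = fsv height j)

theorem getD_set_self (w : List Int) (t : Nat) (v : Int) (ht : t < w.length) :
    (w.set t v).getD t 0 = v := by
  simp [List.getD, ht]

theorem getD_set_ne (w : List Int) (t j : Nat) (v : Int) (hne : j ≠ t) :
    (w.set t v).getD j 0 = w.getD j 0 := by
  simp [List.getD, List.getElem?_set_ne (Ne.symm hne)]

theorem popLoopA_inv (height : List Int) (i : Nat) (hi : i < height.length) :
    ∀ (stack : List Nat) (width : List Int),
    InvA height i (width, stack) →
    InvA height (i + 1) ((popLoopA height i width stack).1, i :: (popLoopA height i width stack).2) := by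
  intro stack
  induction stack with
  | nil =>
    intro width ⟨hlen, _, _, _, hdone⟩
    simp only [popLoopA]
    refine ⟨hlen, by simp, ?_, ?_, ?_⟩
    · intro t ht; simp at ht; omega
    · intro t ht k hk hk'; simp at ht; omega
    · intro j hj hjn
      simp at hjn
      exact hdone j (by omega) (by simp)
  | cons t rest ih =>
    intro width ⟨hlen, hpw, hbnd, hmin, hdone⟩
    have hlen' : width.length = height.length := hlen
    have hpw' : List.Pairwise (· > ·) (t :: rest) := hpw
    have hbnd' : ∀ s ∈ t :: rest, s < i := hbnd
    have hmin' : ∀ s ∈ t :: rest, ∀ k, s < k → k < i → height.getD s 0 ≤ height.getD k 0 := hmin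
    have hdone' : ∀ j, j < i → j ∉ t :: rest → width.getD j 0 = fsv height j := hdone
    clear hlen hpw hbnd hmin hdone
    rw [popLoopA]
    by_cases hpop : height.getD t 0 > height.getD i 0
    · rw [if_pos hpop]
      have ht_lt : t < i := hbnd' t (by simp)
      have ht_len : t < width.length := by omega
      -- the popped index t has first strictly smaller bar exactly at i
      have hfs : firstSmaller height (height.getD t 0) (t + 1) = i := by
        apply firstSmaller_unique
        · omega
        · omega
        · intro k hk hk'; exact hmin' t (by simp) k (by omega) hk'
        · intro _; omega
      apply ih
      refine ⟨by simp [hlen'], hpw'.sublist (by simp), ?_, ?_, ?_⟩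
      · intro s hs; exact hbnd' s (by simp [hs])
      · intro s hs k hk hk'; exact hmin' s (by simp [hs]) k hk hk'
      · intro j hj hjn
        by_cases hjt : j = t
        · subst hjt
          rw [getD_set_self _ _ _ ht_len]
          unfold fsv
          rw [hfs]
        · rw [getD_set_ne _ _ _ _ hjt]
          exact hdone' j hj (by simp [hjn, hjt])
    · rw [if_neg hpop]
      have hti : height.getD t 0 ≤ height.getD i 0 := by omega
      show InvA height (i + 1) (width, i :: t :: rest)
      refine ⟨hlen', ?_, ?_, ?_, ?_⟩
      · -- pairwise on i :: t :: rest
        refine List.Pairwise.cons ?_ hpw'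
        intro s hs; exact hbnd' s hs
      · intro s hs
        rcases List.mem_cons.mp hs with hsi | hs2
        · omega
        · have := hbnd' s hs2; omega
      · intro s hs k hk hk'
        rcases List.mem_cons.mp hs with hsi | hs2
        · -- s = i : empty interval (i, i+1)
          exact absurd hk (by omega)
        · -- s ∈ t :: rest
          by_cases hki : k = i
          · subst hki
            have h1 : height.getD s 0 ≤ height.getD t 0 := by
              rcases List.mem_cons.mp hs2 with hst | hs'
              · rw [hst]
              · have hst : s < t := (List.pairwise_cons.mp hpw').1 s hs'
                exact hmin' s hs2 t hst (hbnd' t (by simp))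
            omega
          · have hk2 : k < i := by omega
            exact hmin' s hs2 k hk hk2
      · intro j hj hjn
        simp only [List.mem_cons, not_or] at hjn
        exact hdone' j (by omega) (by simp [hjn.2.1, hjn.2.2])

theorem foldA_inv (height : List Int) (n : Nat) (hn : n ≤ height.length) :
    InvA height n ((List.range n).foldl (stepA height) (List.replicate height.length 0, [])) := by
  induction n with
  | zero =>
    refine ⟨by simp, by simp, by simp, by simp, ?_⟩
    intro j hj; omega
  | succ n ih =>
    rw [List.range_succ, List.foldl_append, List.foldl_cons, List.foldl_nil]
    have hinv := ih (by omega)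
    set p := (List.range n).foldl (stepA height) (List.replicate height.length 0, []) with hp
    have := popLoopA_inv height n (by omega) p.2 p.1 (by exact hinv)
    simpa [stepA]

theorem getD_final_fold (height : List Int) (s : List Nat) :
    ∀ (w : List Int) (j : Nat), j < w.length →
    (s.foldl (fun w t => w.set t ((height.length : Int) - 1 - (t : Int))) w).getD j 0 =
      if j ∈ s then (height.length : Int) - 1 - (j : Int) else w.getD j 0 := by
  induction s with
  | nil => intro w j hj; simp
  | cons t rest ih =>
    intro w j hj
    rw [List.foldl_cons, ih _ j (by simp [hj])]
    by_cases hjr : j ∈ rest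
    · simp [hjr]
    · rw [if_neg hjr]
      by_cases hjt : j = t
      · subst hjt
        rw [getD_set_self _ _ _ hj, if_pos (by simp)]
      · rw [getD_set_ne _ _ _ _ hjt, if_neg (by simp [hjt, hjr])]

theorem final_fold_length (height : List Int) (s : List Nat) :
    ∀ (w : List Int),
    (s.foldl (fun w t => w.set t ((height.length : Int) - 1 - (t : Int))) w).length = w.length := by
  induction s with
  | nil => intro w; rfl
  | cons t rest ih => intro w; rw [List.foldl_cons, ih]; simp

theorem getD_eq_getElem (w : List Int) (j : Nat) (hj : j < w.length) :
    w.getD j 0 = w[j] := by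
  simp [List.getD, List.getElem?_eq_getElem hj]

-- ===== VERDICT (by name: the statement is the Claim_ definition above) =====
theorem process_spec : Claim_equal_process := by
  intro height _
  unfold Spec_process
  have hinv := foldA_inv height height.length (le_refl _)
  set p := (List.range height.length).foldl (stepA height) (List.replicate height.length 0, []) with hp
  obtain ⟨hlen, hpw, hbnd, hmin, hdone⟩ := hinv
  have hproc : process height =
      p.2.reverse.foldl (fun w t => w.set t ((height.length : Int) - 1 - (t : Int))) p.1 := rfl
  have hlen2 : (process height).length = height.length := by
    rw [hproc, final_fold_length]; exact hlen
  have halt_len : (process_alt height).length = height.length := by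
    unfold process_alt; simp
  apply List.ext_getElem (by rw [hlen2, halt_len])
  intro j h1 h2
  have hjn : j < height.length := by rwa [hlen2] at h1
  have hjw : j < p.1.length := by omega
  rw [← getD_eq_getElem _ _ h1]
  conv_lhs => rw [hproc]
  rw [getD_final_fold height p.2.reverse p.1 j hjw]
  have hrhs : (process_alt height)[j] = fsv height j := by
    unfold process_alt fsv
    simp [hjn]
  rw [hrhs]
  by_cases hjs : j ∈ p.2
  · rw [if_pos (by simpa using hjs)]
    have hfs : firstSmaller height (height.getD j 0) (j + 1) = height.length := by
      apply firstSmaller_unique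
      · have := hbnd j hjs; omega
      · exact le_refl _
      · intro k hk hk'; exact hmin j hjs k (by omega) hk'
      · intro h; omega
    unfold fsv
    rw [hfs]
    omega
  · rw [if_neg (by simpa using hjs)]
    exact hdone j hjn hjs
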